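-- pv_equiv track=rewrite | github.com/tyMadara/knExtr_Medical | function.py | listmerge
-- ===== SOURCE A (Python) =====
-- def listmerge(list, label_list):
--     '''若一个词的标签属于标签列表，则将其标签更改为标签列表的第一个标签，然后将连续的这些标签合并'''
--     flag = 0
--     resList = []
--     for ele in list:
--         if ele[1] not in label_list:
--             flag = 0
--             resList.append([ele[0], ele[1]])
--         elif ele[1] in label_list:
--             if flag == 0:
--                 flag = 1
--                 resList.append([ele[0], label_list[0]])
--             else:
--                 resList[-1][0] = resList[-1][0] + ele[0]
--     return resList
-- ===== SOURCE B (Python) =====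
-- def listmerge(list, label_list):
--     '''Run-based rewrite: scan with an index; a run of consecutive elements whose
--     labels are in label_list is collapsed in one inner sweep.'''
--     labels = set(label_list)
--     res = []
--     i, n = 0, len(list)
--     while i < n:
--         word, lab = list[i][0], list[i][1]
--         i += 1
--         if lab in labels:
--             merged = word
--             while i < n and list[i][1] in labels:
--                 merged = merged + list[i][0]
--                 i += 1
--             res.append([merged, label_list[0]])
--         else:
--             res.append([word, lab])
--     return res
-- ===== Notes on version B (the rewrite author's own statement) =====
-- stated objective: alternative
-- what changed: Replaces A's flag-state loop that repeatedly rewrites resList[-1] with a run-based two-level scan over a precomputed label set: each run of in-list labels is folded into one merged word and emitted once.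
import Mathlib
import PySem

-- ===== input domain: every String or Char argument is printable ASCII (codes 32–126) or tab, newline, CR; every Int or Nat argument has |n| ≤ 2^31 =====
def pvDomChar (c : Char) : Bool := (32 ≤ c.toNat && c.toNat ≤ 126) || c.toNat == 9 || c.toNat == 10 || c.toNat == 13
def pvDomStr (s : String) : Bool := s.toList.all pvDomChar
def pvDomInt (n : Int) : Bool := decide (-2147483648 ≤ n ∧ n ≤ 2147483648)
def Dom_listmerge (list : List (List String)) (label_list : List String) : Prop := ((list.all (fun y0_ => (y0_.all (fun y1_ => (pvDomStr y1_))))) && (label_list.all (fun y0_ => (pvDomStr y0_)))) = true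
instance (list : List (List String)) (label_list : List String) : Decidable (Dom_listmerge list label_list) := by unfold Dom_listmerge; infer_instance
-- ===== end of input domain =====

-- B replaces A's flag-state loop (which rewrites resList[-1]) with a run-based scan over a
-- precomputed label set: alternative decomposition, same asymptotic cost.
-- Return-value equivalence only; neither program mutates its arguments.

-- ===== PORT A =====
-- resList[-1][0] = resList[-1][0] + ele[0]  (update first field of the last element)
def pvUpdLast (w : String) : List (List String) → List (List String)
  | [] => []
  | [e] => [e.set 0 (((PySem.List.pyGet? e 0).getD "") ++ w)]
  | x :: rest => x :: pvUpdLast w rest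

-- loop body of A; state = (flag, resList). ele[0]/ele[1]/label_list[0] via pyGet?;
-- the .getD "" is exact under Pre_listmerge (Python raises IndexError outside it).
def pvStepA (label_list : List String) (st : Int × List (List String)) (ele : List String) :
    Int × List (List String) :=
  let e0 := (PySem.List.pyGet? ele 0).getD ""
  let e1 := (PySem.List.pyGet? ele 1).getD ""
  if e1 ∉ label_list then
    (0, st.2 ++ [[e0, e1]])
  else if e1 ∈ label_list then
    if st.1 = 0 then
      (1, st.2 ++ [[e0, (PySem.List.pyGet? label_list 0).getD ""]])
    else
      (st.1, pvUpdLast e0 st.2)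
  else st

def listmerge (list : List (List String)) (label_list : List String) : List (List String) :=
  (list.foldl (pvStepA label_list) (0, [])).2

-- ===== PORT B =====
-- inner while: consume the rest of a run of in-set labels, folding the word fields with ++
def pvRunB (labels : PySem.Set String) (acc : String) : List (List String) → String × List (List String)
  | [] => (acc, [])
  | e :: rest =>
    if ((PySem.List.pyGet? e 1).getD "") ∈ labels then
      pvRunB labels (acc ++ ((PySem.List.pyGet? e 0).getD "")) rest
    else (acc, e :: rest)

theorem pvRunB_len (labels : PySem.Set String) (acc : String) (l : List (List String)) :
    (pvRunB labels acc l).2.length ≤ l.length := by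
  induction l generalizing acc with
  | nil => simp [pvRunB]
  | cons e rest ih =>
    simp only [pvRunB]
    split
    · exact le_trans (ih _) (Nat.le_succ _)
    · simp

-- outer while: one element, or one whole run, per step
def pvGoB (labels : PySem.Set String) (lab0 : String) : List (List String) → List (List String)
  | [] => []
  | e :: rest =>
    let word := (PySem.List.pyGet? e 0).getD ""
    let lab := (PySem.List.pyGet? e 1).getD ""
    if lab ∈ labels then
      let p := pvRunB labels word rest
      [p.1, lab0] :: pvGoB labels lab0 p.2
    else
      [word, lab] :: pvGoB labels lab0 rest
termination_by l => l.length
decreasing_by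
  · exact Nat.lt_succ_of_le (pvRunB_len labels word rest)
  · simp

def listmerge_alt (list : List (List String)) (label_list : List String) : List (List String) :=
  pvGoB (PySem.Set.ofList label_list) ((PySem.List.pyGet? label_list 0).getD "") list

-- ===== PRECONDITION & SPEC =====
-- Pre_ excludes exactly the inputs where Python A raises IndexError: an element with
-- fewer than two fields (ele[1] is read for every element).
def Pre_listmerge (list : List (List String)) (label_list : List String) : Prop :=
  ∀ e ∈ list, 2 ≤ e.length
instance (list : List (List String)) (label_list : List String) : Decidable (Pre_listmerge list label_list) := by unfold Pre_listmerge; infer_instance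
def pvWitness_listmerge : List (List String) × List String :=
  ([["ab", "X"], ["c", "Y"], ["d", "Y"]], ["Y", "Z"])
def Spec_listmerge (list : List (List String)) (label_list : List String) (out : List (List String)) : Prop := out = listmerge_alt list label_list
instance (list : List (List String)) (label_list : List String) (out : List (List String)) : Decidable (Spec_listmerge list label_list out) := by unfold Spec_listmerge; infer_instance

-- ===== CLAIM (what is proved, stated in full; the proofs are below) =====
def Claim_equal_listmerge : Prop := ∀ (list : List (List String)) (label_list : List String), Dom_listmerge list label_list → Pre_listmerge list label_list → Spec_listmerge list label_list (listmerge list label_list)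

-- ===== LEMMAS AND PROOFS =====

theorem pvUpdLast_append (w : String) (res : List (List String)) (a b : String) :
    pvUpdLast w (res ++ [[a, b]]) = res ++ [[a ++ w, b]] := by
  induction res with
  | nil => simp [pvUpdLast, PySem.List.pyGet?, PySem.List.pyIdx?, List.set]
  | cons x rest ih =>
    cases rest with
    | nil => simp [pvUpdLast, PySem.List.pyGet?, PySem.List.pyIdx?, List.set] at ih ⊢
    | cons y t => simpa [pvUpdLast] using ih

-- joint invariant for A's fold vs B's run recursion, by strong induction on the suffix length
theorem pv_main (label_list : List String) (n : Nat) :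
    (∀ rest : List (List String), rest.length ≤ n → ∀ res : List (List String),
      (rest.foldl (pvStepA label_list) (0, res)).2
        = res ++ pvGoB (PySem.Set.ofList label_list) ((PySem.List.pyGet? label_list 0).getD "") rest) ∧
    (∀ rest : List (List String), rest.length ≤ n → ∀ (res : List (List String)) (w : String),
      (rest.foldl (pvStepA label_list) (1, res ++ [[w, (PySem.List.pyGet? label_list 0).getD ""]])).2
        = res ++ [[(pvRunB (PySem.Set.ofList label_list) w rest).1, (PySem.List.pyGet? label_list 0).getD ""]]
            ++ pvGoB (PySem.Set.ofList label_list) ((PySem.List.pyGet? label_list 0).getD "")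
                (pvRunB (PySem.Set.ofList label_list) w rest).2) := by
  induction n with
  | zero =>
    constructor
    · intro rest h res
      have : rest = [] := List.length_eq_zero_iff.mp (Nat.le_zero.mp h)
      subst this; simp [pvGoB]
    · intro rest h res w
      have : rest = [] := List.length_eq_zero_iff.mp (Nat.le_zero.mp h)
      subst this; simp [pvRunB, pvGoB]
  | succ n ih =>
    obtain ⟨ih1, ih2⟩ := ih
    constructor
    · intro rest h res
      cases rest with
      | nil => simp [pvGoB]
      | cons e rest' =>
        have hlen : rest'.length ≤ n := by simpa using h
        by_cases hmem : ((PySem.List.pyGet? e 1).getD "") ∈ label_list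
        · rw [List.foldl_cons]
          have hstep : pvStepA label_list (0, res) e
              = (1, res ++ [[((PySem.List.pyGet? e 0).getD ""), (PySem.List.pyGet? label_list 0).getD ""]]) := by
            simp [pvStepA, hmem]
          rw [hstep, ih2 rest' hlen]
          rw [pvGoB]
          simp [hmem, PySem.Set.mem_ofList]
        · rw [List.foldl_cons]
          have hstep : pvStepA label_list (0, res) e
              = (0, res ++ [[((PySem.List.pyGet? e 0).getD ""), ((PySem.List.pyGet? e 1).getD "")]]) := by
            simp [pvStepA, hmem]
          rw [hstep, ih1 rest' hlen]
          rw [pvGoB]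
          simp [hmem, PySem.Set.mem_ofList]
    · intro rest h res w
      cases rest with
      | nil => simp [pvRunB, pvGoB]
      | cons e rest' =>
        have hlen : rest'.length ≤ n := by simpa using h
        by_cases hmem : ((PySem.List.pyGet? e 1).getD "") ∈ label_list
        · rw [List.foldl_cons]
          have hstep : pvStepA label_list (1, res ++ [[w, (PySem.List.pyGet? label_list 0).getD ""]]) e
              = (1, res ++ [[w ++ ((PySem.List.pyGet? e 0).getD ""), (PySem.List.pyGet? label_list 0).getD ""]]) := by
            simp [pvStepA, hmem, pvUpdLast_append]
          rw [hstep, ih2 rest' hlen]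
          have hrun : pvRunB (PySem.Set.ofList label_list) w (e :: rest')
              = pvRunB (PySem.Set.ofList label_list) (w ++ ((PySem.List.pyGet? e 0).getD "")) rest' := by
            simp [pvRunB, hmem, PySem.Set.mem_ofList]
          rw [hrun]
        · rw [List.foldl_cons]
          have hstep : pvStepA label_list (1, res ++ [[w, (PySem.List.pyGet? label_list 0).getD ""]]) e
              = (0, res ++ [[w, (PySem.List.pyGet? label_list 0).getD ""]]
                    ++ [[((PySem.List.pyGet? e 0).getD ""), ((PySem.List.pyGet? e 1).getD "")]]) := by
            simp [pvStepA, hmem]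
          rw [hstep, ih1 rest' hlen]
          have hrun : pvRunB (PySem.Set.ofList label_list) w (e :: rest') = (w, e :: rest') := by
            simp [pvRunB, hmem, PySem.Set.mem_ofList]
          rw [hrun, pvGoB]
          simp [hmem, PySem.Set.mem_ofList]

-- ===== VERDICT (by name: the statement is the Claim_ definition above) =====
theorem listmerge_spec : Claim_equal_listmerge := by
  intro list label_list _ _
  unfold Spec_listmerge listmerge listmerge_alt
  simpa using (pv_main label_list list.length).1 list le_rfl []
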